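-- pv_equiv track=rewrite | github.com/KKKKSHI30/Leetcode | _OA/Goldman Sachs/Better Compression.py | betterCompression
-- ===== SOURCE A (Python) =====
-- def betterCompression(s):
--     if s == "":
--         return
--     cur_num = 0
--     cur_alpha = s[0]
--     saving = {}
--     for i, in s[1:]:
--         if ord(i) <= 57 and ord(i) >= 48:
--             cur_num = cur_num*10 + int(i)
--         else:
--             if cur_alpha not in saving:
--                 saving[cur_alpha] = cur_num
--             else:
--                 saving[cur_alpha] += cur_num
--             cur_alpha = i
--             cur_num = 0
--     if cur_alpha not in saving:
--         saving[cur_alpha] = cur_num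
--     else:
--         saving[cur_alpha] += cur_num
--     sorted_saving = sorted(saving.items(), key=lambda item: item[0])
--     results = ""
--     for element in sorted_saving:
--         results += element[0]+ str(element[1])
--     return results
-- ===== SOURCE B (Python) =====
-- import re
--
-- def betterCompression(s):
--     if s == "":
--         return
--     totals = {}
--     for ch, digits in re.findall(r'([\s\S])([0-9]*)', s):
--         totals[ch] = totals.get(ch, 0) + int(digits or '0')
--     return ''.join(k + str(v) for k, v in sorted(totals.items()))
-- ===== Notes on version B (the rewrite author's own statement) =====
-- stated objective: idiomatic
-- what changed: A's char-by-char state machine with mutable cur_num/cur_alpha and an in-loop flush is replaced by a regex tokenization into (char, digit-run) pairs folded into a dict via get(), then sorted and joined.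
import Mathlib
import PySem

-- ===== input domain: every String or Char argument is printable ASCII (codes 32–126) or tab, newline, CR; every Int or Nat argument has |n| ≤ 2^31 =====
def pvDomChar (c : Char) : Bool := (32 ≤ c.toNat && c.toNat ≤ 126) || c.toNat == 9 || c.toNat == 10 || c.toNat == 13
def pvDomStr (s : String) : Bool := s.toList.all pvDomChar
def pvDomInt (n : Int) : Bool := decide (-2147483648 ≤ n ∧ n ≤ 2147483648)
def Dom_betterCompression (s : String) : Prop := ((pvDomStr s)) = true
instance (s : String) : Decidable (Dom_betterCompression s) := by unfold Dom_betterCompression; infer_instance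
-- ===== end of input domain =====

-- B replaces A's char-by-char state machine by a regex-style tokenizer into (char, digit-run)
-- pairs folded into a dict (objective: idiomatic/alternative decomposition; same asymptotic cost).

-- ===== PORT A =====
-- 'if cur_alpha not in saving: saving[cur_alpha] = cur_num else: saving[cur_alpha] += cur_num'
def bcSave (d : PySem.Dict Char Int) (a : Char) (n : Int) : PySem.Dict Char Int :=
  if d.contains a = false then d.insert a n else d.insert a (d.getD a 0 + n)

def betterCompression (s : String) : Option String :=
  match s.toList with
  | [] => none                                  -- if s == "": return (None)
  | c0 :: rest =>                               -- cur_num = 0; cur_alpha = s[0]; loop over s[1:]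
    let st := rest.foldl (fun (st : Int × Char × PySem.Dict Char Int) i =>
      if i.toNat ≤ 57 ∧ 48 ≤ i.toNat then       -- ord(i) <= 57 and ord(i) >= 48
        (st.1 * 10 + ((i.toNat : Int) - 48), st.2.1, st.2.2)  -- int(i): exact, i is one ASCII digit here
      else (0, i, bcSave st.2.2 st.2.1 st.1)) (0, c0, PySem.Dict.empty)
    let saving := bcSave st.2.2 st.2.1 st.1     -- final flush
    let sortedSaving := PySem.List.sorted saving.items (fun item => item.1) false
    some (String.ofList (sortedSaving.foldl (fun r e => r ++ e.1 :: (PySem.Int.toStr e.2).toList) []))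

-- ===== PORT B =====
-- the regex class [0-9]
def bcIsDigit (c : Char) : Bool := 48 ≤ c.toNat && c.toNat ≤ 57

-- re.findall(r'([\s\S])([0-9]*)', s): each match is one char and the digit run after it
def bcFindall : List Char → List (Char × List Char)
  | [] => []
  | c :: rest =>
    (c, rest.takeWhile bcIsDigit) :: bcFindall (rest.dropWhile bcIsDigit)
  termination_by l => l.length
  decreasing_by
    exact Nat.lt_succ_of_le (List.length_dropWhile_le _ _)

-- int(digits or '0'): hand-ported (PySem.Int.ofChars? has no digit-run lemma); exact here
-- because the regex guarantees ds is a (possibly empty) run of ASCII digits '0'-'9'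
def bcIntOf (ds : List Char) : Int :=
  if ds = [] then 0 else ds.foldl (fun a c => a * 10 + ((c.toNat : Int) - 48)) 0

def betterCompression_alt (s : String) : Option String :=
  match s.toList with
  | [] => none
  | c :: rest =>
    let totals := (bcFindall (c :: rest)).foldl
      (fun d t => d.insert t.1 (d.getD t.1 0 + bcIntOf t.2)) PySem.Dict.empty
    some (String.ofList (PySem.Chars.join []
      ((PySem.List.sorted totals.items (fun item => item.1) false).map
        (fun e => e.1 :: (PySem.Int.toStr e.2).toList))))

-- ===== PRECONDITION & SPEC =====
def Spec_betterCompression (s : String) (out : Option String) : Prop := out = betterCompression_alt s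
instance (s : String) (out : Option String) : Decidable (Spec_betterCompression s out) := by unfold Spec_betterCompression; infer_instance

-- ===== CLAIM (what is proved, stated in full; the proofs are below) =====
def Claim_equal_betterCompression : Prop := ∀ (s : String), Dom_betterCompression s → Spec_betterCompression s (betterCompression s)

-- ===== LEMMAS AND PROOFS =====

-- tokens of A's state machine: partial token (alpha, num) still open, rest of input to come
def bcTokAux (num : Int) (alpha : Char) : List Char → List (Char × Int)
  | [] => [(alpha, num)]
  | i :: t =>
    if i.toNat ≤ 57 ∧ 48 ≤ i.toNat then bcTokAux (num * 10 + ((i.toNat : Int) - 48)) alpha t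
    else (alpha, num) :: bcTokAux 0 i t

theorem bcSave_eq (d : PySem.Dict Char Int) (a : Char) (n : Int) :
    bcSave d a n = d.insert a (d.getD a 0 + n) := by
  unfold bcSave
  split
  · rw [PySem.Dict.getD_of_not_contains d 0 (by assumption), zero_add]
  · rfl

-- A's loop followed by the final flush computes the fold of bcSave over bcTokAux
theorem bcLoop_eq_tokens (rest : List Char) :
    ∀ (num : Int) (alpha : Char) (d : PySem.Dict Char Int),
    (let st := rest.foldl (fun (st : Int × Char × PySem.Dict Char Int) i =>
        if i.toNat ≤ 57 ∧ 48 ≤ i.toNat then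
          (st.1 * 10 + ((i.toNat : Int) - 48), st.2.1, st.2.2)
        else (0, i, bcSave st.2.2 st.2.1 st.1)) (num, alpha, d)
     bcSave st.2.2 st.2.1 st.1)
    = (bcTokAux num alpha rest).foldl (fun d t => bcSave d t.1 t.2) d := by
  induction rest with
  | nil => intro num alpha d; simp [bcTokAux]
  | cons i t ih =>
    intro num alpha d
    by_cases h : i.toNat ≤ 57 ∧ 48 ≤ i.toNat
    · simpa [bcTokAux, h] using ih (num * 10 + ((i.toNat : Int) - 48)) alpha d
    · simpa [bcTokAux, h] using ih 0 i (bcSave d alpha num)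

theorem bcFindall_nil : bcFindall [] = [] := by
  unfold bcFindall
  rfl

theorem bcFindall_cons (c : Char) (rest : List Char) :
    bcFindall (c :: rest) =
      (c, rest.takeWhile bcIsDigit) :: bcFindall (rest.dropWhile bcIsDigit) := by
  rw [bcFindall]

theorem bcIsDigit_iff (c : Char) : bcIsDigit c = true ↔ (c.toNat ≤ 57 ∧ 48 ≤ c.toNat) := by
  simp [bcIsDigit, and_comm]

theorem bcIntOf_eq (ds : List Char) :
    bcIntOf ds = ds.foldl (fun a c => a * 10 + ((c.toNat : Int) - 48)) 0 := by
  unfold bcIntOf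
  split
  next h => subst h; rfl
  next h => rfl

-- the state machine's token stream is the tokenizer's (with values parsed)
theorem bcTokAux_eq_findall (l : List Char) :
    ∀ (num : Int) (alpha : Char),
    bcTokAux num alpha l =
      (alpha, (l.takeWhile bcIsDigit).foldl (fun a c => a * 10 + ((c.toNat : Int) - 48)) num)
        :: (bcFindall (l.dropWhile bcIsDigit)).map (fun t => (t.1, bcIntOf t.2)) := by
  induction l with
  | nil => intro num alpha; simp [bcTokAux, bcFindall_nil]
  | cons i t ih =>
    intro num alpha
    by_cases h : i.toNat ≤ 57 ∧ 48 ≤ i.toNat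
    · have hb : bcIsDigit i = true := (bcIsDigit_iff i).mpr h
      simp only [bcTokAux, if_pos h, List.takeWhile_cons, hb, if_true, List.dropWhile_cons,
        List.foldl_cons]
      exact ih _ alpha
    · have hb : bcIsDigit i = false := by
        cases hb' : bcIsDigit i
        · rfl
        · exact absurd ((bcIsDigit_iff i).mp hb') h
      simp only [bcTokAux, if_neg h, List.takeWhile_cons, hb, List.dropWhile_cons,
        Bool.false_eq_true, if_false, List.foldl_nil]
      rw [ih 0 i, bcFindall_cons]
      simp [bcIntOf_eq]

theorem intercalate_nil_eq_flatten {α : Type} (xss : List (List α)) :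
    ([] : List α).intercalate xss = xss.flatten := by
  induction xss with
  | nil => rfl
  | cons x xs ih =>
    cases xs with
    | nil => simp [List.intercalate]
    | cons y ys =>
      simp only [List.intercalate, List.intersperse] at *
      simp_all

-- ===== VERDICT (by name: the statement is the Claim_ definition above) =====
theorem betterCompression_spec : Claim_equal_betterCompression := by
  intro s _
  unfold Spec_betterCompression betterCompression betterCompression_alt
  cases hs : s.toList with
  | nil => rfl
  | cons c rest =>
    simp only []
    rw [bcLoop_eq_tokens rest 0 c PySem.Dict.empty,
        bcTokAux_eq_findall rest 0 c]
    have hfold :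
        (bcFindall (c :: rest)).foldl
            (fun d t => d.insert t.1 (d.getD t.1 0 + bcIntOf t.2)) PySem.Dict.empty
          = ((bcFindall (c :: rest)).map (fun t => (t.1, bcIntOf t.2))).foldl
              (fun d t => d.insert t.1 (d.getD t.1 0 + t.2)) PySem.Dict.empty := by
      rw [List.foldl_map]
    have htok :
        (bcFindall (c :: rest)).map (fun t => (t.1, bcIntOf t.2))
          = (c, bcIntOf (rest.takeWhile bcIsDigit))
              :: (bcFindall (rest.dropWhile bcIsDigit)).map (fun t => (t.1, bcIntOf t.2)) := by
      rw [bcFindall_cons]; rfl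
    rw [hfold, htok, bcIntOf_eq (rest.takeWhile bcIsDigit)]
    simp only [bcSave_eq]
    congr 1
    rw [PySem.List.foldl_append_eq_flatMap
          (fun (e : Char × Int) => e.1 :: (PySem.Int.toStr e.2).toList)]
    simp [PySem.Chars.join, intercalate_nil_eq_flatten, List.flatMap_def]
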